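-- pv_equiv track=rewrite | github.com/GINOXCVIII/SSL_TP_2019 | lexer.py | digit_Automaton
-- ===== SOURCE A (Python) =====
-- TRAP_RESULT = "TRAP"
--
-- ACCEPT_RESULT = "ACCEPT"
--
-- NOACCEPT_RESULT = "NOT ACCEPT"
--
-- TRAP = -1
--
-- def digit_Automaton (string):
-- 	final_state = 1
-- 	state = 0
-- 	for c in string:
-- 		if state == 0 and c.isdigit():
-- 			state = 1
-- 		else:
-- 			state = TRAP
-- 			break
--
-- 	if state == TRAP:
-- 		return TRAP_RESULT
-- 	if state == final_state:
-- 		return ACCEPT_RESULT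
-- 	else:
-- 		if state != TRAP:
-- 			return NOACCEPT_RESULT
-- ===== SOURCE B (Python) =====
-- TRAP_RESULT = "TRAP"
-- ACCEPT_RESULT = "ACCEPT"
-- NOACCEPT_RESULT = "NOT ACCEPT"
--
-- def digit_Automaton(string):
--     if string == "":
--         return NOACCEPT_RESULT
--     if len(string) == 1 and string.isdigit():
--         return ACCEPT_RESULT
--     return TRAP_RESULT
-- ===== Notes on version B (the rewrite author's own statement) =====
-- stated objective: simpler
-- what changed: Replaced the state-machine loop with a closed-form three-way classification: empty -> NOT ACCEPT, single digit -> ACCEPT, anything else -> TRAP.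
import Mathlib
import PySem

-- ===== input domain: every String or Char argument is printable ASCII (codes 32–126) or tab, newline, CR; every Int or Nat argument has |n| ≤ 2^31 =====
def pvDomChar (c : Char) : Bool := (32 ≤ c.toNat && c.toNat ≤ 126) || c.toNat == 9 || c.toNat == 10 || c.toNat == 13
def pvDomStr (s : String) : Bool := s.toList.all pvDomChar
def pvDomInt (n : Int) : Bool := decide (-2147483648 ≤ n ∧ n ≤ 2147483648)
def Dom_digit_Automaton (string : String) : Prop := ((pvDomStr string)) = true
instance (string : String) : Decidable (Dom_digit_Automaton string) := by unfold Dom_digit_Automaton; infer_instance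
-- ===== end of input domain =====

-- ===== PORT A =====
-- the for-loop with break: carries 'state'; returns the state after the loop
def digitAutLoop (state : Int) (cs : List Char) : Int :=
  match cs with
  | [] => state
  | c :: rest =>
      if state == 0 && PySem.Chars.isdigit c then
        digitAutLoop 1 rest
      else
        (-1 : Int)   -- state = TRAP; break

def digit_Automaton (string : String) : String :=
  let final_state : Int := 1
  let state := digitAutLoop 0 string.toList
  if state == -1 then "TRAP"
  else if state == final_state then "ACCEPT"
  else "NOT ACCEPT"

-- ===== PORT B =====
-- B replaces the DFA loop with a closed-form classification: empty -> NOT ACCEPT, single digit -> ACCEPT, else TRAP (simpler).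
def digit_Automaton_alt (string : String) : String :=
  if string == "" then "NOT ACCEPT"
  else if PySem.Str.len string == 1 && PySem.Str.strIsdigit string then "ACCEPT"
  else "TRAP"

-- ===== PRECONDITION & SPEC =====
def Spec_digit_Automaton (string : String) (out : String) : Prop := out = digit_Automaton_alt string
instance (string : String) (out : String) : Decidable (Spec_digit_Automaton string out) := by unfold Spec_digit_Automaton; infer_instance

-- ===== CLAIM (what is proved, stated in full; the proofs are below) =====
def Claim_equal_digit_Automaton : Prop := ∀ (string : String), Dom_digit_Automaton string → Spec_digit_Automaton string (digit_Automaton string)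

-- ===== LEMMAS AND PROOFS =====
theorem digit_Automaton_eq_alt (s : String) :
    digit_Automaton s = digit_Automaton_alt s := by
  rcases h : s.toList with _ | ⟨c, _ | ⟨d, rest⟩⟩
  · simp [digit_Automaton, digit_Automaton_alt, digitAutLoop, h, beq_iff_eq,
      ← String.toList_eq_nil_iff]
  · by_cases hc : PySem.Chars.isdigit c <;>
      simp [digit_Automaton, digit_Automaton_alt, digitAutLoop, h, hc, beq_iff_eq,
        ← String.toList_eq_nil_iff, PySem.Str.len_eq, PySem.Str.strIsdigit,
        PySem.Chars.strIsdigit]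
  · by_cases hc : PySem.Chars.isdigit c <;>
      simp [digit_Automaton, digit_Automaton_alt, digitAutLoop, h, hc, beq_iff_eq,
        ← String.toList_eq_nil_iff, PySem.Str.len_eq] <;>
      (intro habs; exact absurd habs (by omega))

-- ===== VERDICT (by name: the statement is the Claim_ definition above) =====
theorem digit_Automaton_spec : Claim_equal_digit_Automaton :=
  fun s _ => digit_Automaton_eq_alt s
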